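-- pv_equiv track=rewrite | github.com/SergioAle210/Syntax-Par | lex/yalex_utils.py | custom_split_lines
-- ===== SOURCE A (Python) =====
-- def custom_split_lines(text: str) -> list:
--     """Separa el texto en líneas usando el carácter de salto de línea, leyendo caracter por caracter."""
--     lines = []
--     current_line = ""
--     for ch in text:
--         if ch == "\n":
--             lines.append(current_line)
--             current_line = ""
--         else:
--             current_line += ch
--     if current_line != "":
--         lines.append(current_line)
--     return lines
-- ===== SOURCE B (Python) =====
-- def custom_split_lines(text: str) -> list:
--     """Split text into lines at '\n' by locating separators with find and slicing."""
--     lines = []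
--     start = 0
--     idx = text.find("\n", start)
--     while idx != -1:
--         lines.append(text[start:idx])
--         start = idx + 1
--         idx = text.find("\n", start)
--     if start < len(text):
--         lines.append(text[start:])
--     return lines
-- ===== Notes on version B (the rewrite author's own statement) =====
-- stated objective: faster
-- what changed: Instead of scanning character by character and growing the current line by string concatenation, B keeps an integer start position, locates each '\n' with str.find, and slices whole lines out of the text.
import Mathlib
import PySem

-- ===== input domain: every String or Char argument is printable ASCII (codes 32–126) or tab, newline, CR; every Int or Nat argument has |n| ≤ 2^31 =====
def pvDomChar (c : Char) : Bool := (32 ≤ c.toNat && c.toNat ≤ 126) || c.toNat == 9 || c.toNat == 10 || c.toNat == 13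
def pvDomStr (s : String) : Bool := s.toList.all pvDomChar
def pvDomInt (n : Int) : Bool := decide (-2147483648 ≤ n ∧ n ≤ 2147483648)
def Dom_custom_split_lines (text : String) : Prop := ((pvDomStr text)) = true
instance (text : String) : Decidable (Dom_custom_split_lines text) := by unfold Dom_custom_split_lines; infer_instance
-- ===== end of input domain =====

-- B replaces A's char-by-char accumulation (quadratic string concatenation) by locating each '\n'
-- with find and slicing whole lines out of the text (objective: faster).


-- ===== PORT A =====
-- A's for-loop over the characters, carrying (lines, current_line), then the final
-- `if current_line != "": lines.append(current_line)`.
def pvGoA (lines : List String) (cur : List Char) (cs : List Char) : List String :=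
  match cs with
  | [] => if cur ≠ [] then lines ++ [String.ofList cur] else lines
  | c :: rest =>
      if c = '\n' then pvGoA (lines ++ [String.ofList cur]) [] rest
      else pvGoA lines (cur ++ [c]) rest

def custom_split_lines (text : String) : List String :=
  pvGoA [] [] text.toList

-- ===== PORT B =====
-- B's while-loop: find the next '\n' from the current position, slice the line out,
-- continue after it; finally append the remainder only if non-empty.
def pvGoB (cs : List Char) : List String :=
  match h : cs.findIdx? (· = '\n') with
  | some i => String.ofList (cs.take i) :: pvGoB (cs.drop (i + 1))
  | none => if cs = [] then [] else [String.ofList cs]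
termination_by cs.length
decreasing_by
  have hne : cs ≠ [] := by rintro rfl; simp at h
  have : 0 < cs.length := List.length_pos_iff.mpr hne
  simp only [List.length_drop]; omega

def custom_split_lines_alt (text : String) : List String :=
  pvGoB text.toList

-- ===== PRECONDITION & SPEC =====
def Spec_custom_split_lines (text : String) (out : List String) : Prop := out = custom_split_lines_alt text
instance (text : String) (out : List String) : Decidable (Spec_custom_split_lines text out) := by unfold Spec_custom_split_lines; infer_instance

-- ===== CLAIM (what is proved, stated in full; the proofs are below) =====
def Claim_equal_custom_split_lines : Prop := ∀ (text : String), Dom_custom_split_lines text → Spec_custom_split_lines text (custom_split_lines text)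

-- ===== LEMMAS AND PROOFS =====

theorem pvGoA_append (lines : List String) (cur : List Char) (cs : List Char) :
    pvGoA lines cur cs = lines ++ pvGoA [] cur cs := by
  induction cs generalizing lines cur with
  | nil => simp [pvGoA]; split <;> simp
  | cons c rest ih =>
      simp only [pvGoA]
      split
      · rw [ih (lines ++ [String.ofList cur])]
        conv_rhs => rw [ih ([] ++ [String.ofList cur])]
        simp
      · exact ih lines (cur ++ [c])

theorem pvGoA_eq_pvGoB (cur cs : List Char) (hcur : '\n' ∉ cur) :
    pvGoA [] cur cs = pvGoB (cur ++ cs) := by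
  induction cs generalizing cur with
  | nil =>
      have hfind : (cur ++ ([] : List Char)).findIdx? (· = '\n') = none := by
        rw [List.findIdx?_eq_none_iff]
        intro x hx
        simp only [List.append_nil] at hx
        simp only [decide_eq_false_iff_not]
        rintro rfl; exact hcur hx
      rw [pvGoB, hfind]
      simp only [pvGoA, List.append_nil]
      split <;> simp_all
  | cons c rest ih =>
      have hfc : cur.findIdx? (· = '\n') = none := by
        rw [List.findIdx?_eq_none_iff]; intro x hx
        simp only [decide_eq_false_iff_not]; rintro rfl; exact hcur hx
      by_cases hc : c = '\n'
      · subst hc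
        have hfind : (cur ++ '\n' :: rest).findIdx? (· = '\n') = some cur.length := by
          rw [List.findIdx?_append, hfc, List.findIdx?_cons]
          simp
        rw [pvGoB, hfind]
        simp only [pvGoA, if_pos]
        rw [pvGoA_append, ih [] (by simp)]
        have ht : (cur ++ '\n' :: rest).take cur.length = cur := by
          simp
        have hd : (cur ++ '\n' :: rest).drop (cur.length + 1) = rest := by
          simp [List.drop_append]
        rw [ht, hd]
        simp
      · have : pvGoA [] (cur ++ [c]) rest = pvGoB ((cur ++ [c]) ++ rest) :=
          ih (cur ++ [c]) (by simp [hcur]; rintro rfl; exact hc rfl)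
        simp only [pvGoA, if_neg hc]
        rw [this]; simp

-- ===== VERDICT (by name: the statement is the Claim_ definition above) =====
theorem custom_split_lines_spec : Claim_equal_custom_split_lines := by
  intro text _
  unfold Spec_custom_split_lines custom_split_lines custom_split_lines_alt
  simpa using pvGoA_eq_pvGoB [] text.toList (by simp)
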